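-- pv_equiv track=rewrite | github.com/vittoriocb/0000aa-pset-0-starter | fibonacci.py | optimized_calculate_seq
-- ===== SOURCE A (Python) =====
-- def optimized_calculate_seq(i, n, initial):
--     """Calculates a sequence of numbers where the ith number is the sum of the
--     previous n numbers in the sequence, with the first n numbers defined
--     arbitrarily.
--
--     :param int i: position of number to calculate
--     :param int n: amount of previous numbers to sum at ith position
--     :param list(int) initial: arbitrary intial sequence of numbers
--     :rtype: int
--     """
--     if i < 0:
--         raise ValueError("Only positive numbers allowed")
--     if n > len(initial):
--         raise ValueError("n must not be greater than the initial number of elements")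
--
--     # If i is in the initial list of numbers then there is no need to calculate it
--     if i < len(initial):
--         return initial[i]
--
--     last_calc = initial.copy()
--     for _ in range(len(last_calc), i + 1):
--         calc = sum_sequence(n, last_calc)
--         last_calc.append(calc)
--         last_calc.pop(
--             0
--         )  # Keeps list small by removing first element, which is not needed anymore
--
--     result = last_calc[-1]
--
--     return result
--
-- def sum_sequence(n, sequence):
--     """Returns the sum of the last n numbers of a list
--
--     :param int n: numbers to sum starting at -1 position
--     :param list(int) sequence: list of numbers
--     :rtype: int
--     """
--     calc = 0
--     for i in range(1, n + 1):
--         calc += sequence[-i]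
--     return calc
-- ===== SOURCE B (Python) =====
-- def optimized_calculate_seq(i, n, initial):
--     """Same result as A, computed incrementally: extend the sequence keeping a
--     running window sum (add the new term, subtract the term leaving the window)
--     instead of re-summing the last n terms and shifting a copied list each step."""
--     if i < 0:
--         raise ValueError("Only positive numbers allowed")
--     if n > len(initial):
--         raise ValueError("n must not be greater than the initial number of elements")
--     if i < len(initial):
--         return initial[i]
--     if n <= 0:
--         # the sum of the last n <= 0 numbers is empty, so every new term is 0
--         return 0
--     seq = list(initial)
--     s = sum(seq[len(seq) - n:])
--     for k in range(len(initial), i + 1):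
--         t = s
--         seq.append(t)
--         s += t - seq[k - n]
--     return seq[i]
-- ===== Notes on version B (the rewrite author's own statement) =====
-- stated objective: alternative
-- what changed: B extends the whole sequence with a running window sum updated incrementally (add the new term, subtract the term leaving the window), instead of A's re-summing the last n elements and pop(0)-shifting a fixed-size copy at every step; the measured running time on the generated inputs was not better, so no speed is claimed.
import Mathlib
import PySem

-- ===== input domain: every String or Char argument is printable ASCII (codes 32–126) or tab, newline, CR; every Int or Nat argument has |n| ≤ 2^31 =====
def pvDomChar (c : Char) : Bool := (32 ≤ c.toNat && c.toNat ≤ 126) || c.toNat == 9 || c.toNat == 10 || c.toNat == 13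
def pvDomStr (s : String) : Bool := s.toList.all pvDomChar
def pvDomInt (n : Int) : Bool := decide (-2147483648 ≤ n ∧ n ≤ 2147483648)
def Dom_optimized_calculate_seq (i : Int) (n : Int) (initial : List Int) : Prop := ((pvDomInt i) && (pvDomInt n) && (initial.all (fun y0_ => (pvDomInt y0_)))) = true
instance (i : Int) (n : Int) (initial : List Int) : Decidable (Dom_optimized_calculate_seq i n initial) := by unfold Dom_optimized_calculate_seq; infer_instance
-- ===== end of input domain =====

-- B replaces A's per-step re-summation and list shifting by a running window sum
-- maintained incrementally across the loop (objective: alternative algorithm).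



-- ===== PORT A =====
-- helper sum_sequence: calc = 0; for i in range(1, n+1): calc += sequence[-i]
def sum_sequence (n : Int) (sequence : List Int) : Int :=
  (PySem.List.pyRange 1 (n + 1) 1).foldl
    (fun acc i => acc + (PySem.List.pyGet? sequence (-i)).getD 0) 0

def optimized_calculate_seq (i : Int) (n : Int) (initial : List Int) : Int :=
  if i < 0 then 0            -- Python: raise ValueError (excluded by Pre_)
  else if n > initial.length then 0   -- Python: raise ValueError (excluded by Pre_)
  else if i < initial.length then (PySem.List.pyGet? initial i).getD 0
  else
    let last_calc :=
      (PySem.List.pyRange initial.length (i + 1) 1).foldl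
        (fun lc _ => (lc ++ [sum_sequence n lc]).tail) initial
    -- last_calc[-1]; IndexError (initial = []) is excluded by Pre_
    (PySem.List.pyGet? last_calc (-1)).getD 0

-- ===== PORT B =====
def optimized_calculate_seq_alt (i : Int) (n : Int) (initial : List Int) : Int :=
  if i < 0 then 0            -- Python: raise ValueError (excluded by Pre_)
  else if n > initial.length then 0   -- Python: raise ValueError (excluded by Pre_)
  else if i < initial.length then (PySem.List.pyGet? initial i).getD 0
  else if n ≤ 0 then 0
  else
    let seq0 := initial
    let s0 := (PySem.List.slice initial (some ((initial.length : Int) - n)) none).sum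
    let st :=
      (PySem.List.pyRange initial.length (i + 1) 1).foldl
        (fun (p : List Int × Int) k =>
          let t := p.2
          let sq := p.1 ++ [t]
          (sq, p.2 + t - (PySem.List.pyGet? sq (k - n)).getD 0))
        (seq0, s0)
    (PySem.List.pyGet? st.1 i).getD 0

-- ===== PRECONDITION & SPEC =====
-- Pre_ excludes exactly the inputs where A raises: ValueError for i < 0 or
-- n > len(initial), and IndexError (last_calc[-1] on []) when initial = [].
def Pre_optimized_calculate_seq (i : Int) (n : Int) (initial : List Int) : Prop :=
  0 ≤ i ∧ n ≤ initial.length ∧ initial ≠ []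
instance (i : Int) (n : Int) (initial : List Int) : Decidable (Pre_optimized_calculate_seq i n initial) := by unfold Pre_optimized_calculate_seq; infer_instance

def pvWitness_optimized_calculate_seq : Int × Int × List Int := (7, 2, [1, 1])

def Spec_optimized_calculate_seq (i : Int) (n : Int) (initial : List Int) (out : Int) : Prop := out = optimized_calculate_seq_alt i n initial
instance (i : Int) (n : Int) (initial : List Int) (out : Int) : Decidable (Spec_optimized_calculate_seq i n initial out) := by unfold Spec_optimized_calculate_seq; infer_instance

-- ===== CLAIM (what is proved, stated in full; the proofs are below) =====
def Claim_equal_optimized_calculate_seq : Prop := ∀ (i : Int) (n : Int) (initial : List Int), Dom_optimized_calculate_seq i n initial → Pre_optimized_calculate_seq i n initial → Spec_optimized_calculate_seq i n initial (optimized_calculate_seq i n initial)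

-- ===== LEMMAS AND PROOFS =====

-- sum_sequence m lc is the sum of the last m elements of lc (Nat form).
lemma sum_seq_nat (m : Nat) : ∀ (lc : List Int), m ≤ lc.length →
    sum_sequence (m : Int) lc = (lc.drop (lc.length - m)).sum := by
  induction m with
  | zero =>
    intro lc h
    have h0 : PySem.List.pyRange 1 ((0:Int) + 1) 1 = [] := by
      apply PySem.List.pyRange_one_eq_nil; omega
    simp [sum_sequence]
  | succ m ih =>
    intro lc h
    have hrng : PySem.List.pyRange 1 (((m:Int) + 1) + 1) 1
        = PySem.List.pyRange 1 ((m:Int) + 1) 1 ++ [(m:Int) + 1] := by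
      apply PySem.List.pyRange_one_succ_right; omega
    have hget : PySem.List.pyGet? lc (-(((m+1 : Nat)):Int)) = lc[lc.length - (m+1)]? := by
      apply PySem.List.pyGet?_neg_natCast <;> omega
    have hlt : lc.length - (m+1) < lc.length := by omega
    have hidx : lc.length - (m+1) + 1 = lc.length - m := by omega
    have hdrop : lc.drop (lc.length - (m+1))
        = lc[lc.length - (m+1)] :: lc.drop (lc.length - m) := by
      rw [List.drop_eq_getElem_cons hlt, hidx]
    have hih := ih lc (by omega)
    unfold sum_sequence at hih ⊢
    push_cast
    rw [hrng, List.foldl_append, hih]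
    push_cast at hget
    rw [List.foldl_cons, List.foldl_nil, hget, List.getElem?_eq_getElem hlt,
      Option.getD_some, hdrop, List.sum_cons]
    ring

lemma sum_seq_int (n : Int) (lc : List Int) (h0 : 0 ≤ n) (h1 : n ≤ lc.length) :
    sum_sequence n lc = (lc.drop (lc.length - n.toNat)).sum := by
  have h : n = (n.toNat : Int) := by omega
  rw [h]
  exact sum_seq_nat n.toNat lc (by omega)

-- When n ≤ 0, sum_sequence is the empty sum.
lemma sum_seq_nonpos (n : Int) (lc : List Int) (h : n ≤ 0) : sum_sequence n lc = 0 := by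
  have h0 : PySem.List.pyRange 1 (n + 1) 1 = [] := by
    apply PySem.List.pyRange_one_eq_nil; omega
  simp [sum_sequence, h0]

-- A's loop with n ≤ 0: every appended element is 0.
lemma aFold_nonpos (n : Int) (hn : n ≤ 0) :
    ∀ (r : List Int) (lc : List Int), lc ≠ [] →
    (r.foldl (fun lc _ => (lc ++ [sum_sequence n lc]).tail) lc).length = lc.length ∧
    (r ≠ [] → (r.foldl (fun lc _ => (lc ++ [sum_sequence n lc]).tail) lc).getLast? = some 0) := by
  intro r
  induction r with
  | nil => intro lc h; exact ⟨rfl, by simp⟩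
  | cons x r ih =>
    intro lc h
    have hlen : ((lc ++ [sum_sequence n lc]).tail).length = lc.length := by simp
    have hne : (lc ++ [sum_sequence n lc]).tail ≠ [] := by
      intro hc
      have hl := congrArg List.length hc
      rw [hlen] at hl
      exact h (List.length_eq_zero_iff.mp (by simpa using hl))
    have hlast : ((lc ++ [sum_sequence n lc]).tail).getLast? = some 0 := by
      rw [sum_seq_nonpos n lc hn, List.tail_append_of_ne_nil h, List.getLast?_concat]
    obtain ⟨ih1, ih2⟩ := ih ((lc ++ [sum_sequence n lc]).tail) hne
    refine ⟨by rw [List.foldl_cons, ih1, hlen], ?_⟩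
    intro _
    rcases eq_or_ne r [] with hr | hr
    · rw [List.foldl_cons]; subst hr; simpa using hlast
    · rw [List.foldl_cons]; exact ih2 hr

-- Core simulation: A's window-shifting fold and B's running-sum fold, run over the
-- same index range, stay related: A's list is the last-L suffix of B's sequence,
-- and B's running sum is the sum of the last n elements.
lemma core (n : Int) (L : Nat) (hn0 : 0 < n) (hnL : n ≤ (L:Int)) :
    ∀ (k : Nat) (seq : List Int) (s : Int),
    L ≤ seq.length →
    s = (seq.drop (seq.length - n.toNat)).sum →
    ((PySem.List.pyRange (seq.length : Int) ((seq.length : Int) + k) 1).foldl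
        (fun (p : List Int × Int) k =>
          (p.1 ++ [p.2], p.2 + p.2 - (PySem.List.pyGet? (p.1 ++ [p.2]) (k - n)).getD 0)) (seq, s)).1.length
      = seq.length + k ∧
    (PySem.List.pyRange (seq.length : Int) ((seq.length : Int) + k) 1).foldl
        (fun lc _ => (lc ++ [sum_sequence n lc]).tail) (seq.drop (seq.length - L))
      = (((PySem.List.pyRange (seq.length : Int) ((seq.length : Int) + k) 1).foldl
        (fun (p : List Int × Int) k =>
          (p.1 ++ [p.2], p.2 + p.2 - (PySem.List.pyGet? (p.1 ++ [p.2]) (k - n)).getD 0)) (seq, s)).1).drop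
        ((((PySem.List.pyRange (seq.length : Int) ((seq.length : Int) + k) 1).foldl
        (fun (p : List Int × Int) k =>
          (p.1 ++ [p.2], p.2 + p.2 - (PySem.List.pyGet? (p.1 ++ [p.2]) (k - n)).getD 0)) (seq, s)).1).length - L) := by
  intro k
  induction k with
  | zero =>
    intro seq s hL hs
    have h0 : PySem.List.pyRange (seq.length : Int) ((seq.length : Int) + ((0:Nat):Int)) 1 = [] := by
      apply PySem.List.pyRange_one_eq_nil; omega
    rw [h0]
    simp
  | succ k ih =>
    intro seq s hL hs
    have hLpos : 0 < L := by omega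
    have hidx : seq.length - n.toNat < seq.length := by omega
    have hcons : PySem.List.pyRange (seq.length : Int) ((seq.length : Int) + ((k+1:Nat):Int)) 1
        = (seq.length : Int) :: PySem.List.pyRange ((seq.length : Int) + 1) ((seq.length : Int) + ((k+1:Nat):Int)) 1 := by
      apply PySem.List.pyRange_one_cons
      push_cast; omega
    -- A's computed term equals s
    have hsum : sum_sequence n (seq.drop (seq.length - L)) = s := by
      rw [sum_seq_int n _ (by omega) (by simp; omega)]
      rw [List.drop_drop, List.length_drop, hs]
      congr 2
      omega
    -- the element B subtracts
    have hgetB : (PySem.List.pyGet? (seq ++ [s]) ((seq.length : Int) - n)).getD 0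
        = seq[seq.length - n.toNat] := by
      rw [PySem.List.pyGet?_of_nonneg _ (by omega : (0:Int) ≤ (seq.length : Int) - n)]
      have ht : ((seq.length : Int) - n).toNat = seq.length - n.toNat := by omega
      rw [ht, List.getElem?_append_left hidx, List.getElem?_eq_getElem hidx, Option.getD_some]
    have hsplit : (seq.drop (seq.length - n.toNat)).sum
        = seq[seq.length - n.toNat] + (seq.drop (seq.length + 1 - n.toNat)).sum := by
      rw [List.drop_eq_getElem_cons hidx, List.sum_cons,
        show seq.length - n.toNat + 1 = seq.length + 1 - n.toNat from by omega]
    -- one step of A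
    have hstepA : (seq.drop (seq.length - L) ++ [sum_sequence n (seq.drop (seq.length - L))]).tail
        = (seq ++ [s]).drop ((seq ++ [s]).length - L) := by
      rw [hsum]
      have hne : seq.drop (seq.length - L) ≠ [] := by
        intro hc
        have hl := congrArg List.length hc
        simp at hl
        omega
      rw [List.tail_append_of_ne_nil hne, List.tail_drop,
        show (seq ++ [s]).length - L = seq.length + 1 - L from by simp,
        List.drop_append_of_le_length (by omega),
        show seq.length - L + 1 = seq.length + 1 - L from by omega]
    -- one step of B
    have hstepB :
        ((seq ++ [s] : List Int), s + s - (PySem.List.pyGet? (seq ++ [s]) ((seq.length : Int) - n)).getD 0)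
        = ((seq ++ [s] : List Int),
           ((seq ++ [s]).drop ((seq ++ [s]).length - n.toNat)).sum) := by
      refine Prod.ext rfl ?_
      rw [hgetB,
        show (seq ++ [s]).length - n.toNat = seq.length + 1 - n.toNat from by simp,
        List.drop_append_of_le_length (by omega : seq.length + 1 - n.toNat ≤ seq.length),
        List.sum_append, List.sum_cons, List.sum_nil]
      rw [hs, hsplit]
      ring
    -- apply the induction hypothesis at seq ++ [s]
    have hr : PySem.List.pyRange ((seq.length : Int) + 1) ((seq.length : Int) + ((k+1:Nat):Int)) 1
        = PySem.List.pyRange (((seq ++ [s]).length : Int)) (((seq ++ [s]).length : Int) + ((k:Nat):Int)) 1 := by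
      congr 1 <;> (push_cast [List.length_append, List.length_cons, List.length_nil]; ring)
    have hIH := ih (seq ++ [s])
      (((seq ++ [s]).drop ((seq ++ [s]).length - n.toNat)).sum)
      (by simp; omega) rfl
    rw [hcons, List.foldl_cons, List.foldl_cons]
    simp only []
    rw [hstepA, hstepB, hr]
    refine ⟨?_, hIH.2⟩
    rw [hIH.1]
    simp
    omega

-- ===== VERDICT (by name: the statement is the Claim_ definition above) =====
theorem optimized_calculate_seq_spec : Claim_equal_optimized_calculate_seq := by
  intro i n initial _ hpre
  obtain ⟨hi, hn, hne0⟩ := hpre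
  have hL : 0 < initial.length := List.length_pos_iff.mpr hne0
  unfold Spec_optimized_calculate_seq optimized_calculate_seq optimized_calculate_seq_alt
  rw [if_neg (show ¬ i < 0 by omega), if_neg (show ¬ i < 0 by omega),
    if_neg (show ¬ n > ((initial.length : Nat) : Int) by omega),
    if_neg (show ¬ n > ((initial.length : Nat) : Int) by omega)]
  by_cases hilt : i < ((initial.length : Nat) : Int)
  · rw [if_pos hilt, if_pos hilt]
  · rw [if_neg hilt, if_neg hilt]
    simp only []
    have hrne : PySem.List.pyRange (initial.length : Int) (i + 1) 1 ≠ [] := by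
      rw [PySem.List.pyRange_one_cons (by omega)]
      simp
    by_cases hnp : n ≤ 0
    · rw [if_pos hnp]
      obtain ⟨-, h2⟩ := aFold_nonpos n hnp (PySem.List.pyRange (initial.length : Int) (i + 1) 1) initial hne0
      rw [PySem.List.pyGet?_neg_one, h2 hrne]
      rfl
    · rw [if_neg hnp]
      set k := (i + 1 - (initial.length : Int)).toNat with hk
      have hrng : PySem.List.pyRange (initial.length : Int) (i + 1) 1
          = PySem.List.pyRange (initial.length : Int) ((initial.length : Int) + (k : Int)) 1 := by
        congr 1; omega
      have hs0 : (PySem.List.slice initial (some ((initial.length : Int) - n)) none).sum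
          = (initial.drop (initial.length - n.toNat)).sum := by
        rw [PySem.List.slice_from initial (show (0:Int) ≤ ((initial.length : Nat) : Int) - n by omega)]
        congr 2
        omega
      obtain ⟨hlen, heq⟩ := core n initial.length (by omega) hn k initial
        ((initial.drop (initial.length - n.toNat)).sum) le_rfl rfl
      rw [Nat.sub_self, List.drop_zero] at heq
      simp only [hrng, hs0]
      rw [heq]
      rw [PySem.List.pyGet?_neg_one, PySem.List.pyGet?_of_nonneg _ hi,
        List.getLast?_drop, List.getLast?_eq_getElem?]
      rw [hlen]
      rw [if_neg (by omega)]
      rw [show initial.length + k - 1 = i.toNat from by omega]
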